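-- pv_equiv track=rewrite | github.com/saulrazo/superlogic-project | superlogic/calculator/trueFunctions.py | validate_Expression
-- ===== SOURCE A (Python) =====
-- def validate_Expression(operation):
--     # En esta funcion, se evalua la expresion y se analiza si es que hay 2 variables juntas, lo cual la volveria una
--     # proposicion invalida
--     op_List = []
--     op_List[:0] = operation
--     possible = ["p", "q", "r"]
--     long_Operation = int(len(op_List))
--     for i in range(long_Operation):
--         if op_List[i] in possible:
--             if (i + 1) >= long_Operation:
--                 return True
--             if op_List[i + 1] in possible:
--                 return False
--     return True
-- ===== SOURCE B (Python) =====
-- import re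
--
-- def validate_Expression(operation):
--     # Valid iff no two variable characters (p, q, r) are adjacent.
--     return re.search(r'[pqr][pqr]', operation) is None
-- ===== Notes on version B (the rewrite author's own statement) =====
-- stated objective: idiomatic
-- what changed: Replaced the manual index loop with its bounds guard and early returns by a single regex search for two adjacent variable characters.
import Mathlib
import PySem

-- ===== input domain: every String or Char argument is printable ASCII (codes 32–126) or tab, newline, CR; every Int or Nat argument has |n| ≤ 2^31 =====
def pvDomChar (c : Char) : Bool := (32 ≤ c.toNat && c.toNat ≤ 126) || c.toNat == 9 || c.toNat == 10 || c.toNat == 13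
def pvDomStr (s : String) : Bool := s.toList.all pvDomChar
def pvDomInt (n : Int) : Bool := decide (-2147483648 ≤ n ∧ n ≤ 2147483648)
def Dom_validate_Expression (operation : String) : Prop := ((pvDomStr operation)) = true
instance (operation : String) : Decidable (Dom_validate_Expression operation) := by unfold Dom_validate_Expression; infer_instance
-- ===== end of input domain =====

-- ===== PORT A =====
-- B differs from A by delegating adjacency detection to one regex search instead of an index loop.
def pvIsVar (c : Char) : Bool := c == 'p' || c == 'q' || c == 'r'

-- the index loop of A, with its early returns, as structural recursion on the index
def pvLoopA (l : List Char) (i : Nat) : Bool :=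
  if h : i < l.length then
    if pvIsVar l[i] then
      if i + 1 ≥ l.length then true
      else if pvIsVar (l.getD (i + 1) ' ') then false
      else pvLoopA l (i + 1)
    else pvLoopA l (i + 1)
  else true
termination_by l.length - i

def validate_Expression (operation : String) : Bool :=
  pvLoopA operation.toList 0

-- ===== PORT B =====
-- the regex search for r'[pqr][pqr]': scan for two adjacent variable characters
def pvHasAdj : List Char → Bool
  | a :: b :: rest => (pvIsVar a && pvIsVar b) || pvHasAdj (b :: rest)
  | _ => false

def validate_Expression_alt (operation : String) : Bool :=
  !pvHasAdj operation.toList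

-- ===== PRECONDITION & SPEC =====
def Spec_validate_Expression (operation : String) (out : Bool) : Prop := out = validate_Expression_alt operation
instance (operation : String) (out : Bool) : Decidable (Spec_validate_Expression operation out) := by unfold Spec_validate_Expression; infer_instance

-- ===== CLAIM (what is proved, stated in full; the proofs are below) =====
def Claim_equal_validate_Expression : Prop := ∀ (operation : String), Dom_validate_Expression operation → Spec_validate_Expression operation (validate_Expression operation)

-- ===== LEMMAS AND PROOFS =====

-- ===== VERDICT (by name: the statement is the Claim_ definition above) =====
lemma pvLoopA_eq (l : List Char) (i : Nat) : pvLoopA l i = !pvHasAdj (l.drop i) := by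
  induction i using pvLoopA.induct l with
  | case1 i h hv hge =>
    have hd : l.drop i = [l[i]] := by
      rw [List.drop_eq_getElem_cons h, List.drop_eq_nil_of_le (by omega)]
    rw [pvLoopA, hd]
    simp [h, hv, hge, pvHasAdj]
  | case2 i h hv hge hb =>
    have hlt : i + 1 < l.length := by omega
    have hd : l.drop i = l[i] :: l[i+1] :: l.drop (i+2) := by
      rw [List.drop_eq_getElem_cons h, List.drop_eq_getElem_cons hlt]
    have hb' : pvIsVar l[i+1] = true := by
      simpa [List.getD, List.getElem?_eq_getElem hlt] using hb
    rw [pvLoopA, hd, pvHasAdj]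
    simp [h, hv, hge, hb', List.getD, List.getElem?_eq_getElem hlt]
  | case3 i h hv hge hb ih =>
    have hlt : i + 1 < l.length := by omega
    have hd : l.drop i = l[i] :: l[i+1] :: l.drop (i+2) := by
      rw [List.drop_eq_getElem_cons h, List.drop_eq_getElem_cons hlt]
    have hb' : pvIsVar l[i+1] = false := by
      have := hb
      simpa [List.getD, List.getElem?_eq_getElem hlt] using this
    have hd1 : l.drop (i+1) = l[i+1] :: l.drop (i+2) := List.drop_eq_getElem_cons hlt
    rw [pvLoopA]
    simp only [h, dite_true, hv, if_true, hge, ite_false, hb]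
    rw [ih, hd, hd1, pvHasAdj]
    simp [hb']
  | case4 i h hv ih =>
    have hd : l.drop i = l[i] :: l.drop (i+1) := List.drop_eq_getElem_cons h
    rw [pvLoopA]
    simp only [h, dite_true, hv]
    rw [ih, hd]
    cases hrest : l.drop (i+1) with
    | nil => simp [pvHasAdj]
    | cons b rest => rw [pvHasAdj]; simp [hv]
  | case5 i h =>
    have hd : l.drop i = [] := List.drop_eq_nil_of_le (by omega)
    rw [pvLoopA, hd]
    simp [h, pvHasAdj]

theorem validate_Expression_spec : Claim_equal_validate_Expression := by
  intro operation _
  unfold Spec_validate_Expression validate_Expression validate_Expression_alt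
  simpa using pvLoopA_eq operation.toList 0
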